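-- pv_equiv track=rewrite | github.com/bibiibjorn/MCP-DEV | core/dax/context_analyzer.py | _extract_filter_arguments
-- ===== SOURCE A (Python) =====
-- from typing import Dict, List, Optional, Set, Tuple, Any
--
-- def _extract_filter_arguments(body: str) -> List[str]:
--     """Extract filter arguments from CALCULATE body"""
--     # Split by comma at the top level (not inside parentheses)
--     filters = []
--     depth = 0
--     current_arg = ""
--
--     for char in body:
--         if char == '(':
--             depth += 1
--             current_arg += char
--         elif char == ')':
--             depth -= 1
--             current_arg += char
--         elif char == ',' and depth == 0:
--             # Found a top-level comma - this separates arguments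
--             arg = current_arg.strip()
--             if arg and not arg.startswith('['):  # Skip the first argument (expression)
--                 # Extract just the filter description (first 50 chars)
--                 filters.append(arg[:50] + "..." if len(arg) > 50 else arg)
--             current_arg = ""
--         else:
--             current_arg += char
--
--     # Add the last argument
--     arg = current_arg.strip()
--     if arg and filters:  # Only add if we already have filters (skip first arg)
--         filters.append(arg[:50] + "..." if len(arg) > 50 else arg)
--
--     return filters
-- ===== SOURCE B (Python) =====
-- from typing import List
-- from itertools import accumulate
--
-- def _extract_filter_arguments(body: str) -> List[str]:
--     # Depth-prefix via running sum, mark top-level commas with NUL, then split on NUL.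
--     depths = accumulate((1 if c == '(' else -1 if c == ')' else 0 for c in body), initial=0)
--     marked = ''.join('\0' if c == ',' and d == 0 else c for c, d in zip(body, depths))
--     segments = marked.split('\0')
--     mids = [s.strip() for s in segments[:-1]]
--     filters = [a[:50] + "..." if len(a) > 50 else a
--                for a in mids if a and not a.startswith('[')]
--     last = segments[-1].strip()
--     if last and filters:
--         filters.append(last[:50] + "..." if len(last) > 50 else last)
--     return filters
-- ===== Notes on version B (the rewrite author's own statement) =====
-- stated objective: alternative
-- what changed: B replaces A's single stateful scan (mutable depth counter, current_arg string, append-while-scanning) by a data-flow pipeline: a depth prefix via itertools.accumulate, marking top-level commas with a NUL sentinel, one str.split on the sentinel, then filter/truncate comprehensions plus separate last-segment handling.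
import Mathlib
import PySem

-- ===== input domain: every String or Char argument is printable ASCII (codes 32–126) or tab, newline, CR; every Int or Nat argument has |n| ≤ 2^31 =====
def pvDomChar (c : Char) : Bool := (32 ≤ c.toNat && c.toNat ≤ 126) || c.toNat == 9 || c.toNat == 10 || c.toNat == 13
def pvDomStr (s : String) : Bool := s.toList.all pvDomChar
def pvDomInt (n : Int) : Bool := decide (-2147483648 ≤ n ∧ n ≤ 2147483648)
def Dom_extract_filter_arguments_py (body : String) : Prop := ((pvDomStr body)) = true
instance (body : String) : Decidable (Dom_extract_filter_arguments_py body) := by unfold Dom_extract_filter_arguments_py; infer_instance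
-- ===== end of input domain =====

-- B replaces A's stateful scan-and-append loop by a data-flow pipeline: a running depth
-- prefix (accumulate), marking top-level commas with NUL, one str.split, then comprehensions.
-- Alternative decomposition, same cost.

-- shared truncation: arg[:50] + "..." if len(arg) > 50 else arg  (identical expression in both Pythons)
def pvTrunc (a : List Char) : String :=
  if 50 < a.length then String.ofList (PySem.Chars.slice a none (some 50) ++ "...".toList)
  else String.ofList a

-- ===== PORT A =====
-- one step of A's character loop; state = (filters, depth, current_arg)
def pvAStep (st : List String × Int × List Char) (c : Char) : List String × Int × List Char :=
  let (filters, depth, cur) := st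
  if c == '(' then (filters, depth + 1, cur ++ [c])
  else if c == ')' then (filters, depth - 1, cur ++ [c])
  else if c == ',' && depth == 0 then
    let a := PySem.Chars.strip cur
    (if !a.isEmpty && !PySem.Chars.startswith a ['['] then filters ++ [pvTrunc a] else filters,
     depth, [])
  else (filters, depth, cur ++ [c])

def extract_filter_arguments_py (body : String) : List String :=
  let st := body.toList.foldl pvAStep ([], 0, [])
  let filters := st.1
  let a := PySem.Chars.strip st.2.2
  if !a.isEmpty && !filters.isEmpty then filters ++ [pvTrunc a] else filters

-- ===== PORT B =====
-- 1 if c == '(' else -1 if c == ')' else 0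
def pvDelta (c : Char) : Int := if c == '(' then 1 else if c == ')' then -1 else 0

def extract_filter_arguments_py_alt (body : String) : List String :=
  let cs := body.toList
  -- depths = accumulate(deltas, initial=0); zip truncates to the depth BEFORE each char
  let depths := cs.scanl (fun d c => d + pvDelta c) 0
  -- marked = '\0' where a top-level comma sits, the original character elsewhere
  let marked := (cs.zip depths).map (fun p => if p.1 == ',' && p.2 == 0 then '\x00' else p.1)
  let segments := PySem.Chars.splitOn marked ['\x00']
  let mids := segments.dropLast.map PySem.Chars.strip
  let filters := (mids.filter (fun a => !a.isEmpty && !PySem.Chars.startswith a ['['])).map pvTrunc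
  let last := PySem.Chars.strip (segments.getLastD [])
  if !last.isEmpty && !filters.isEmpty then filters ++ [pvTrunc last] else filters

-- ===== PRECONDITION & SPEC =====
def Spec_extract_filter_arguments_py (body : String) (out : List String) : Prop := out = extract_filter_arguments_py_alt body
instance (body : String) (out : List String) : Decidable (Spec_extract_filter_arguments_py body out) := by unfold Spec_extract_filter_arguments_py; infer_instance

-- ===== CLAIM (what is proved, stated in full; the proofs are below) =====
def Claim_equal_extract_filter_arguments_py : Prop := ∀ (body : String), Dom_extract_filter_arguments_py body → Spec_extract_filter_arguments_py body (extract_filter_arguments_py body)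

-- ===== LEMMAS AND PROOFS =====

-- proof-side reference: the top-level comma-separated segments of the input (cur = segment prefix)
def pvSegments : List Char → Int → List Char → List (List Char)
  | [], _, cur => [cur]
  | c :: rest, depth, cur =>
    if c == ',' && depth == 0 then cur :: pvSegments rest depth []
    else pvSegments rest (if c == '(' then depth + 1 else if c == ')' then depth - 1 else depth)
           (cur ++ [c])

-- proof-side reference: the marking pass as one recursion carrying the depth
def pvMark : List Char → Int → List Char
  | [], _ => []
  | c :: rest, d => (if c == ',' && d == 0 then '\x00' else c) :: pvMark rest (d + pvDelta c)

-- what A's loop appends for one completed (non-last) segment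
def pvKeep (seg : List Char) : List String :=
  let a := PySem.Chars.strip seg
  if !a.isEmpty && !PySem.Chars.startswith a ['['] then [pvTrunc a] else []

theorem pvSegments_ne_nil (cs : List Char) (d : Int) (cur : List Char) :
    pvSegments cs d cur ≠ [] := by
  induction cs generalizing d cur with
  | nil => simp [pvSegments]
  | cons c rest ih =>
    simp only [pvSegments]
    split <;> simp [ih]

-- B's marking pipeline (zip with the scanned depths) is pvMark
theorem pvZipMark (cs : List Char) (d : Int) :
    (cs.zip (cs.scanl (fun d c => d + pvDelta c) d)).map
        (fun p => if p.1 == ',' && p.2 == 0 then '\x00' else p.1)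
      = pvMark cs d := by
  induction cs generalizing d with
  | nil => simp [pvMark]
  | cons c rest ih =>
    rw [List.scanl_cons]
    simp only [List.zip_cons_cons, List.map_cons, ih, pvMark]

theorem pvMark_length (cs : List Char) (d : Int) : (pvMark cs d).length = cs.length := by
  induction cs generalizing d with
  | nil => rfl
  | cons c rest ih => simp [pvMark, ih]

-- splitting the marked string on NUL recovers the top-level segments
theorem pvGoMark (fuel : Nat) (cs : List Char) (d : Int) (cur : List Char)
    (acc : List (List Char)) (hf : cs.length ≤ fuel)
    (hn : ∀ c ∈ cs, c ≠ '\x00') :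
    PySem.Chars.splitOn.go ['\x00'] fuel (pvMark cs d) cur acc
      = acc.reverse ++ pvSegments cs d cur.reverse := by
  induction fuel generalizing cs d cur acc with
  | zero =>
    have : cs = [] := List.eq_nil_of_length_eq_zero (Nat.le_zero.mp hf)
    subst this
    rw [PySem.Chars.splitOn.go]
    simp [pvMark, pvSegments]
  | succ fuel ih =>
    cases cs with
    | nil =>
      rw [pvMark, PySem.Chars.splitOn.go]
      simp [pvSegments]
      omega
    | cons c rest =>
      have hrest : ∀ x ∈ rest, x ≠ '\x00' := fun x hx => hn x (List.mem_cons_of_mem _ hx)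
      have hflen : rest.length ≤ fuel := by simpa using hf
      by_cases hc : c = ',' ∧ d = 0
      · obtain ⟨hc1, hc2⟩ := hc; subst hc1; subst hc2
        have hm : pvMark (',' :: rest) 0 = '\x00' :: pvMark rest 0 := by
          simp [pvMark, pvDelta]
        rw [hm, PySem.Chars.splitOn.go]
        have hpre : List.isPrefixOf ['\x00'] ('\x00' :: pvMark rest 0) = true := by
          simp [List.isPrefixOf]
        simp only [hpre, if_pos]
        have := ih rest 0 [] (cur.reverse :: acc) hflen hrest
        simp only [List.drop_succ_cons, List.length_nil, List.drop_zero, List.length_cons] at this ⊢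
        rw [this]
        simp [pvSegments]
      · have hb : (c == ',' && d == 0) = false := by
          rcases Decidable.not_and_iff_not_or_not.mp hc with h | h <;> simp [h]
        have hm : pvMark (c :: rest) d = c :: pvMark rest (d + pvDelta c) := by
          simp [pvMark, hb]
        rw [hm, PySem.Chars.splitOn.go]
        have hcne : c ≠ '\x00' := hn c (List.mem_cons_self ..)
        have hpre : List.isPrefixOf ['\x00'] (c :: pvMark rest (d + pvDelta c)) = false := by
          simp [List.isPrefixOf]
          exact fun h => absurd h.symm hcne
        simp only [hpre, Bool.false_eq_true, if_false]
        have := ih rest (d + pvDelta c) (c :: cur) acc hflen hrest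
        rw [this]
        have hs : pvSegments (c :: rest) d cur.reverse
            = pvSegments rest (d + pvDelta c) (cur.reverse ++ [c]) := by
          by_cases hp : c = '(' <;> by_cases hq : c = ')' <;>
            simp [pvSegments, hb, hp, hq, pvDelta, sub_eq_add_neg]
        rw [hs]
        simp

theorem pvSplitMark (cs : List Char) (hn : ∀ c ∈ cs, c ≠ '\x00') :
    PySem.Chars.splitOn (pvMark cs 0) ['\x00'] = pvSegments cs 0 [] := by
  unfold PySem.Chars.splitOn
  rw [pvGoMark ((pvMark cs 0).length + 1) cs 0 [] [] (by rw [pvMark_length]; omega) hn]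
  simp

-- B's filter/map comprehension over the stripped segments is the flatten of pvKeep
theorem pvFilterMap (xs : List (List Char)) :
    ((xs.map PySem.Chars.strip).filter
        (fun a => !a.isEmpty && !PySem.Chars.startswith a ['['])).map pvTrunc
      = (xs.map pvKeep).flatten := by
  induction xs with
  | nil => simp
  | cons x xs ih =>
    simp only [List.map_cons, List.filter_cons, List.flatten_cons, pvKeep]
    split <;> simp_all

-- loop invariant: A's scan from any state equals pvSegments' decomposition of the rest
theorem pvMain (cs : List Char) (filters : List String) (d : Int) (cur : List Char) :
    (cs.foldl pvAStep (filters, d, cur)).1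
        = filters ++ (((pvSegments cs d cur).dropLast.map pvKeep).flatten)
    ∧ (cs.foldl pvAStep (filters, d, cur)).2.2 = (pvSegments cs d cur).getLastD [] := by
  induction cs generalizing filters d cur with
  | nil => simp [pvSegments]
  | cons c rest ih =>
    rw [List.foldl_cons]
    by_cases h1 : c = '('
    · subst h1
      have hA : pvAStep (filters, d, cur) '(' = (filters, d + 1, cur ++ ['(']) := by
        simp [pvAStep]
      have hS : pvSegments ('(' :: rest) d cur = pvSegments rest (d + 1) (cur ++ ['(']) := by
        simp [pvSegments]
      rw [hA, hS]; exact ih filters (d + 1) (cur ++ ['('])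
    · by_cases h2 : c = ')'
      · subst h2
        have hA : pvAStep (filters, d, cur) ')' = (filters, d - 1, cur ++ [')']) := by
          simp [pvAStep]
        have hS : pvSegments (')' :: rest) d cur = pvSegments rest (d - 1) (cur ++ [')']) := by
          simp [pvSegments]
        rw [hA, hS]; exact ih filters (d - 1) (cur ++ [')'])
      · by_cases h3 : c = ',' ∧ d = 0
        · obtain ⟨hc, hd⟩ := h3; subst hc; subst hd
          have hne := pvSegments_ne_nil rest 0 ([] : List Char)
          have hA : pvAStep (filters, 0, cur) ',' = (filters ++ pvKeep cur, 0, []) := by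
            simp only [pvAStep, pvKeep]
            rw [if_neg (by decide), if_neg (by decide), if_pos (by decide)]
            split <;> simp
          have hS : pvSegments (',' :: rest) 0 cur = cur :: pvSegments rest 0 [] := by
            simp [pvSegments]
          rw [hA, hS, List.dropLast_cons_of_ne_nil hne]
          rcases ih (filters ++ pvKeep cur) 0 [] with ⟨ihl, ihr⟩
          refine ⟨by rw [ihl]; simp, ?_⟩
          rw [ihr]
          rcases e : pvSegments rest 0 [] with _ | ⟨y, ys⟩
          · exact absurd e hne
          · simp [List.getLastD]
        · have hb : (c == ',' && d == 0) = false := by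
            rcases Decidable.not_and_iff_not_or_not.mp h3 with h | h <;> simp [h]
          have hA : pvAStep (filters, d, cur) c = (filters, d, cur ++ [c]) := by
            simp [pvAStep, h1, h2, hb]
          have hS : pvSegments (c :: rest) d cur = pvSegments rest d (cur ++ [c]) := by
            simp [pvSegments, h1, h2, hb]
          rw [hA, hS]; exact ih filters d (cur ++ [c])

-- ===== VERDICT (by name: the statement is the Claim_ definition above) =====
theorem extract_filter_arguments_py_spec : Claim_equal_extract_filter_arguments_py := by
  intro body hdom
  have hn : ∀ c ∈ body.toList, c ≠ '\x00' := by
    intro c hc he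
    have := List.all_eq_true.mp hdom c hc
    subst he
    simp [pvDomChar] at this
  unfold Spec_extract_filter_arguments_py extract_filter_arguments_py extract_filter_arguments_py_alt
  rcases pvMain body.toList [] 0 [] with ⟨hl, hr⟩
  simp only [pvZipMark, pvSplitMark body.toList hn, pvFilterMap, hl, hr, List.nil_append]
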